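-- pv_equiv track=rewrite | github.com/msh0576/LS-WNCS | Models/util_model.py | timer_check
-- ===== SOURCE A (Python) =====
-- def timer_check(timer, num_plant, max_step=1000):
--     times = []
--     conflict = False
--     for syst_id in range(num_plant):
--         if timer[syst_id] > 0 and timer[syst_id] < max_step:
--             times.append(timer[syst_id])
--
--     if len(times) != len(set(times)):
--         conflict = True
--     return conflict
-- ===== SOURCE B (Python) =====
-- def timer_check(timer, num_plant, max_step=1000):
--     seen = set()
--     for syst_id in range(num_plant):
--         v = timer[syst_id]
--         if 0 < v < max_step:
--             if v in seen:
--                 return True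
--             seen.add(v)
--     return False
-- ===== Notes on version B (the rewrite author's own statement) =====
-- stated objective: simpler
-- what changed: Instead of materialising the list of active timer values and comparing its length with the length of its set afterwards, B makes a single pass that maintains a running 'seen' set and returns True immediately on the first repeated active value.
import Mathlib
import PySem

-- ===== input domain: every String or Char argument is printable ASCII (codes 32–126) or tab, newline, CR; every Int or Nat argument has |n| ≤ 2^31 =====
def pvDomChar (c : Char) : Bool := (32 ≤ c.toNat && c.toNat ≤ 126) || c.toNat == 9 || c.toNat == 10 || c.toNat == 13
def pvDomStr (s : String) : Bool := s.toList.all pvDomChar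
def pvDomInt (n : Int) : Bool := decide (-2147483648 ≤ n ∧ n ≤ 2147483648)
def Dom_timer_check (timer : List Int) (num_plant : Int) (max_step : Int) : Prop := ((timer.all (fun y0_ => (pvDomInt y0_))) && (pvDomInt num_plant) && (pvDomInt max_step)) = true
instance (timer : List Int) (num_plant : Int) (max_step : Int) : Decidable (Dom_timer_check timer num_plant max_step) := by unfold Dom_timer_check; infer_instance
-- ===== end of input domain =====

-- B replaces A's "collect active values, then compare len(list) with len(set)" by a single
-- pass with a running 'seen' set and an early return on the first repeated active value (objective: simpler).


-- ===== PORT A =====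
-- 'timer[syst_id]' is pyGetD (total form of xs[i]); Pre_ guarantees every index is in range.
def timer_check (timer : List Int) (num_plant : Int) (max_step : Int) : Bool :=
  let times : List Int :=
    (PySem.List.pyRange 0 num_plant 1).foldl
      (fun acc syst_id =>
        if PySem.List.pyGetD timer syst_id 0 > 0 ∧ PySem.List.pyGetD timer syst_id 0 < max_step
        then acc ++ [PySem.List.pyGetD timer syst_id 0] else acc) []
  let conflict : Bool := false
  if times.length ≠ (PySem.Set.ofList times).length then true else conflict

-- ===== PORT B =====
-- the 'for syst_id in range(num_plant)' loop of Source B with its early 'return True'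
def timer_check_alt_loop (timer : List Int) (max_step : Int) :
    List Int → PySem.Set Int → Bool
  | [], _ => false
  | syst_id :: rest, seen =>
    let v := PySem.List.pyGetD timer syst_id 0
    if 0 < v ∧ v < max_step then
      if PySem.Set.contains seen v then true
      else timer_check_alt_loop timer max_step rest (PySem.Set.add seen v)
    else timer_check_alt_loop timer max_step rest seen

def timer_check_alt (timer : List Int) (num_plant : Int) (max_step : Int) : Bool :=
  timer_check_alt_loop timer max_step (PySem.List.pyRange 0 num_plant 1) PySem.Set.empty

-- ===== PRECONDITION & SPEC =====
-- Python A raises IndexError when num_plant exceeds len(timer); exactly those inputs are excluded.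
def Pre_timer_check (timer : List Int) (num_plant : Int) (max_step : Int) : Prop :=
  num_plant ≤ (timer.length : Int)
instance (timer : List Int) (num_plant : Int) (max_step : Int) : Decidable (Pre_timer_check timer num_plant max_step) := by unfold Pre_timer_check; infer_instance

def pvWitness_timer_check : List Int × Int × Int := ([1, 2, 1], 3, 1000)

def Spec_timer_check (timer : List Int) (num_plant : Int) (max_step : Int) (out : Bool) : Prop := out = timer_check_alt timer num_plant max_step
instance (timer : List Int) (num_plant : Int) (max_step : Int) (out : Bool) : Decidable (Spec_timer_check timer num_plant max_step out) := by unfold Spec_timer_check; infer_instance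

-- ===== CLAIM (what is proved, stated in full; the proofs are below) =====
def Claim_equal_timer_check : Prop := ∀ (timer : List Int) (num_plant : Int) (max_step : Int), Dom_timer_check timer num_plant max_step → Pre_timer_check timer num_plant max_step → Spec_timer_check timer num_plant max_step (timer_check timer num_plant max_step)

-- ===== LEMMAS AND PROOFS =====

-- the (Prop-test) filter A's collection loop amounts to, and the value read at an index
def pvVal (timer : List Int) (i : Int) : Int := PySem.List.pyGetD timer i 0
def pvAct (timer : List Int) (max_step i : Int) : Bool :=
  decide (0 < pvVal timer i ∧ pvVal timer i < max_step)

-- A's collected 'times' list, via the library loop-shape lemma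
lemma timer_check_times_eq (timer : List Int) (num_plant max_step : Int) :
    (PySem.List.pyRange 0 num_plant 1).foldl
      (fun acc syst_id =>
        if PySem.List.pyGetD timer syst_id 0 > 0 ∧ PySem.List.pyGetD timer syst_id 0 < max_step
        then acc ++ [PySem.List.pyGetD timer syst_id 0] else acc) []
    = ((PySem.List.pyRange 0 num_plant 1).filter (pvAct timer max_step)).map (pvVal timer) := by
  have := PySem.List.foldl_append_ite
    (p := fun i => PySem.List.pyGetD timer i 0 > 0 ∧ PySem.List.pyGetD timer i 0 < max_step)
    (f := fun i => PySem.List.pyGetD timer i 0)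
    (l := PySem.List.pyRange 0 num_plant 1) (acc := [])
  simp only [List.nil_append] at this
  rw [this]
  rfl

-- Set.ofList keeps a subsequence of its input
lemma foldl_add_sublist (l : List Int) : ∀ s : PySem.Set Int,
    (l.foldl PySem.Set.add s).Sublist (s ++ l) := by
  induction l with
  | nil => intro s; simp
  | cons x xs ih =>
    intro s
    simp only [List.foldl_cons]
    by_cases h : x ∈ s
    · have : PySem.Set.add s x = s := by
        simp [PySem.Set.add, h]
      rw [this]
      exact (ih s).trans (List.Sublist.append_left (List.sublist_cons_self x xs) s)
    · have : PySem.Set.add s x = s ++ [x] := by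
        simp [PySem.Set.add, h]
      rw [this]
      have := ih (s ++ [x])
      simpa [List.append_assoc] using this

lemma ofList_sublist (vs : List Int) : (PySem.Set.ofList vs).Sublist vs := by
  have := foldl_add_sublist vs ([] : PySem.Set Int)
  simpa [PySem.Set.ofList_eq_foldl] using this

-- 'len(times) != len(set(times))' is exactly 'times has a duplicate'
lemma len_ne_len_ofList_iff (vs : List Int) :
    vs.length ≠ (PySem.Set.ofList vs).length ↔ ¬ vs.Nodup := by
  constructor
  · intro h hnd
    exact h (by rw [PySem.Set.ofList_eq_self_of_nodup vs hnd])
  · intro hnd h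
    have := (ofList_sublist vs).eq_of_length h.symm
    exact hnd (this ▸ PySem.Set.nodup_ofList vs)

-- B's loop returns true iff the seen set together with the active values still to come has a duplicate
lemma timer_check_alt_loop_iff (timer : List Int) (max_step : Int) :
    ∀ (l : List Int) (s : PySem.Set Int), s.Nodup →
      (timer_check_alt_loop timer max_step l s = true ↔
        ¬ (s ++ (l.filter (pvAct timer max_step)).map (pvVal timer)).Nodup) := by
  intro l
  induction l with
  | nil => intro s hs; simpa [timer_check_alt_loop] using hs
  | cons i rest ih =>
    intro s hs
    by_cases hp : 0 < pvVal timer i ∧ pvVal timer i < max_step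
    · have hfil : pvAct timer max_step i = true := by simp [pvAct, hp.1, hp.2]
      by_cases hmem : pvVal timer i ∈ s
      · have hc : PySem.Set.contains s (pvVal timer i) = true := List.elem_eq_true_of_mem hmem
        have step : timer_check_alt_loop timer max_step (i :: rest) s = true := by
          have hp' := hp
          simp only [pvVal] at hp' hc
          simp only [timer_check_alt_loop]
          rw [if_pos hp', if_pos hc]
        rw [step]
        constructor
        · intro _ hnd
          rw [List.filter_cons_of_pos hfil, List.map_cons] at hnd
          exact (List.disjoint_of_nodup_append hnd) hmem (List.mem_cons_self)
        · intro _; rfl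
      · have hc : PySem.Set.contains s (pvVal timer i) = false :=
          Bool.eq_false_iff.mpr (fun h => hmem (List.mem_of_elem_eq_true h))
        have hadd : PySem.Set.add s (pvVal timer i) = s ++ [pvVal timer i] := by
          simp [PySem.Set.add, hmem]
        have hnd' : (s ++ [pvVal timer i]).Nodup := by
          refine List.Nodup.append hs (List.nodup_singleton _) ?_
          intro a ha hb
          rw [List.mem_singleton] at hb
          exact hmem (hb ▸ ha)
        have step : timer_check_alt_loop timer max_step (i :: rest) s
            = timer_check_alt_loop timer max_step rest (s ++ [pvVal timer i]) := by
          have hp' := hp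
          have hc' := hc
          have hadd' := hadd
          simp only [pvVal] at hp' hc' hadd'
          simp only [timer_check_alt_loop]
          rw [if_pos hp', if_neg (by rw [hc']; simp), hadd']
          rfl
        rw [step, ih _ hnd', List.filter_cons_of_pos hfil, List.map_cons]
        simp [List.append_assoc]
    · have hfil : pvAct timer max_step i = false := by
        simp only [pvAct, decide_eq_false_iff_not]; exact hp
      have step : timer_check_alt_loop timer max_step (i :: rest) s
          = timer_check_alt_loop timer max_step rest s := by
        have hp' := hp
        simp only [pvVal] at hp'
        simp only [timer_check_alt_loop]
        rw [if_neg hp']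
      rw [step, ih _ hs, List.filter_cons_of_neg (by simp [hfil])]

-- ===== VERDICT (by name: the statement is the Claim_ definition above) =====
theorem timer_check_spec : Claim_equal_timer_check := by
  intro timer num_plant max_step _ _
  unfold Spec_timer_check
  set vs := ((PySem.List.pyRange 0 num_plant 1).filter (pvAct timer max_step)).map (pvVal timer)
    with hvs
  have hA : timer_check timer num_plant max_step = true ↔ ¬ vs.Nodup := by
    unfold timer_check
    rw [timer_check_times_eq, ← hvs]
    by_cases h : vs.length ≠ (PySem.Set.ofList vs).length
    · simp [h, (len_ne_len_ofList_iff vs).mp h]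
    · simp only [if_neg h]
      simp only [len_ne_len_ofList_iff] at h
      simp [not_not.mp h]
  have hB : timer_check_alt timer num_plant max_step = true ↔ ¬ vs.Nodup := by
    unfold timer_check_alt
    rw [timer_check_alt_loop_iff timer max_step _ PySem.Set.empty List.nodup_nil]
    simp [PySem.Set.empty, hvs]
  exact Bool.eq_iff_iff.mpr (hA.trans hB.symm)
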